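-- pv_equiv track=rewrite | github.com/miliar/Code_Jam_Webscraper | Solutions_in_python/Problem_199/my_sol.py | get_flipper_bin
-- ===== SOURCE A (Python) =====
-- def get_flipper_bin(flipper_length):
--     """
--     Ror flipper_length == 3,
--       returns 0b111
--
--     For flipper_length == 8,
--       returns 0xff == 0b11111111
--
--     etc...
--     """
--
--     assert flipper_length > 0
--
--     B = 2
--     f = 0
--     for i in range(flipper_length):
--         f *= B
--         f += 1
--     return f
-- ===== SOURCE B (Python) =====
-- def get_flipper_bin(flipper_length):
--     """
--     Ror flipper_length == 3,
--       returns 0b111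
--
--     For flipper_length == 8,
--       returns 0xff == 0b11111111
--
--     etc...
--     """
--
--     assert flipper_length > 0
--
--     return (1 << flipper_length) - 1
-- ===== Notes on version B (the rewrite author's own statement) =====
-- stated objective: simpler
-- what changed: Replaces the O(n) accumulator loop f = f*2 + 1 with the closed-form bit-shift expression (1 << flipper_length) - 1.
import Mathlib
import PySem

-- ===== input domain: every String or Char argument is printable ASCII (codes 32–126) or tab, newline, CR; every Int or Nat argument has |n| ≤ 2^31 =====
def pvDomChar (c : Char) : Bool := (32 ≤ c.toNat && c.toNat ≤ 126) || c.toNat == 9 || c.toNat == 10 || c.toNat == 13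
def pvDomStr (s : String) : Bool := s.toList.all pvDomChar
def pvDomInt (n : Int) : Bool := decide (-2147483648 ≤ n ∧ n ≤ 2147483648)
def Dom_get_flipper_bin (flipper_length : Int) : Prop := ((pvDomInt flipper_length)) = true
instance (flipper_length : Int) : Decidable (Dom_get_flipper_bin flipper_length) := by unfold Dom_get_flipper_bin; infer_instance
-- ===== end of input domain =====

-- B replaces A's per-bit accumulator loop (f = f*2 + 1 repeated n times) with the closed-form
-- bit-shift expression (1 << n) - 1; objective: simpler.

-- ===== PORT A =====
def get_flipper_bin (flipper_length : Int) : Int :=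
  -- B = 2; f = 0; for i in range(flipper_length): f *= B; f += 1; return f
  let B : Int := 2
  (PySem.List.pyRange 0 flipper_length 1).foldl (fun f _ => f * B + 1) 0

-- ===== PORT B =====
def get_flipper_bin_alt (flipper_length : Int) : Int :=
  -- return (1 << flipper_length) - 1
  ((1 : Int) <<< flipper_length.toNat) - 1

-- ===== PRECONDITION & SPEC =====
-- Pre_ excludes flipper_length ≤ 0, where A's `assert flipper_length > 0` raises AssertionError.
def Pre_get_flipper_bin (flipper_length : Int) : Prop := flipper_length > 0
instance (flipper_length : Int) : Decidable (Pre_get_flipper_bin flipper_length) := by unfold Pre_get_flipper_bin; infer_instance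
def pvWitness_get_flipper_bin : Int := 3
def Spec_get_flipper_bin (flipper_length : Int) (out : Int) : Prop := out = get_flipper_bin_alt flipper_length
instance (flipper_length : Int) (out : Int) : Decidable (Spec_get_flipper_bin flipper_length out) := by unfold Spec_get_flipper_bin; infer_instance

-- ===== CLAIM (what is proved, stated in full; the proofs are below) =====
def Claim_equal_get_flipper_bin : Prop := ∀ (flipper_length : Int), Dom_get_flipper_bin flipper_length → Pre_get_flipper_bin flipper_length → Spec_get_flipper_bin flipper_length (get_flipper_bin flipper_length)

-- ===== LEMMAS AND PROOFS =====
-- The loop body ignores the loop index, so the fold depends only on the list's LENGTH: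
-- starting from a, after k steps the accumulator is a * 2^k + (2^k - 1).
theorem foldl_double_add_one (l : List Int) (a : Int) :
    l.foldl (fun f _ => f * 2 + 1) a = a * 2 ^ l.length + (2 ^ l.length - 1) := by
  induction l generalizing a with
  | nil => simp
  | cons x xs ih =>
      simp only [List.foldl_cons, ih, List.length_cons, pow_succ]
      ring

-- ===== VERDICT (by name: the statement is the Claim_ definition above) =====
theorem get_flipper_bin_spec : Claim_equal_get_flipper_bin := by
  intro n _ _
  unfold Spec_get_flipper_bin get_flipper_bin get_flipper_bin_alt
  simp only [foldl_double_add_one, PySem.List.length_pyRange_one, zero_mul, zero_add,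
    Int.shiftLeft_eq, one_mul]
  norm_num
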